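-- pv_equiv track=rewrite | github.com/Tahaahm/dreamHaven | python-ai-service/app/frame_extractor.py | _bucket_seeds
-- ===== SOURCE A (Python) =====
-- from typing import List, Dict, Tuple, Optional
--
-- COVERAGE_BUCKETS       = 5
--
-- def _bucket_seeds(
--     ranked: List[Tuple[int, Dict]], total: int
-- ) -> List[Tuple[int, Dict]]:
--     """Pick the best frame from each temporal bucket for coverage."""
--     bsize   = max(1, total // COVERAGE_BUCKETS)
--     buckets: Dict[int, Optional[Tuple[int, Dict]]] = {
--         b: None for b in range(COVERAGE_BUCKETS)
--     }
--     for fi, sc in ranked: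
--         b = min(fi // bsize, COVERAGE_BUCKETS - 1)
--         if buckets[b] is None:
--             buckets[b] = (fi, sc)
--     return [v for v in buckets.values() if v is not None]
-- ===== SOURCE B (Python) =====
-- from typing import List, Dict, Tuple
--
-- COVERAGE_BUCKETS = 5
--
-- def _bucket_seeds(
--     ranked: List[Tuple[int, Dict]], total: int
-- ) -> List[Tuple[int, Dict]]:
--     """Pick the first-ranked frame of each temporal bucket, in bucket order."""
--     bsize = max(1, total // COVERAGE_BUCKETS)
--     out = []
--     for b in range(COVERAGE_BUCKETS):
--         hit = next(
--             (p for p in ranked if min(p[0] // bsize, COVERAGE_BUCKETS - 1) == b),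
--             None,
--         )
--         if hit is not None:
--             out.append(hit)
--     return out
-- ===== Notes on version B (the rewrite author's own statement) =====
-- stated objective: alternative
-- what changed: Replaces the single pass that fills a bucket->first-frame dict with an outer loop over the 5 bucket indices that scans ranked for the first frame falling in that bucket, so the dict table disappears entirely.
import Mathlib
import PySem

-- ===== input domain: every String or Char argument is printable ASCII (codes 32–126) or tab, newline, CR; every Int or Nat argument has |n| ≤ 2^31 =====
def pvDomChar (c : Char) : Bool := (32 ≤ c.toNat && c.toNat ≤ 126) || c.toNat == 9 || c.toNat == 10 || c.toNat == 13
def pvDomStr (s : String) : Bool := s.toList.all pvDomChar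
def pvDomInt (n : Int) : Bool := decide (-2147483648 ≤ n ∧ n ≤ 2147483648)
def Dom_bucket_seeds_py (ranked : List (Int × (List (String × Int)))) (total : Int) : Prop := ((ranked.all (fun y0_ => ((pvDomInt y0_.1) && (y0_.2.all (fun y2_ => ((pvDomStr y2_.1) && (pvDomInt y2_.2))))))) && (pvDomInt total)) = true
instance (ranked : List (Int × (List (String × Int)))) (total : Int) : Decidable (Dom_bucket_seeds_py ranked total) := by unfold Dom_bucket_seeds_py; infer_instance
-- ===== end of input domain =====

-- B replaces A's single pass over `ranked` filling a bucket->first-frame dict by an outer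
-- loop over the 5 bucket indices with one first-match scan of `ranked` per bucket
-- (alternative decomposition, same result).

-- ===== PORT A =====
def bucket_seeds_py (ranked : List (Int × (List (String × Int)))) (total : Int) : List (Int × (List (String × Int))) :=
  let bsize := max 1 (PySem.Int.floordiv total 5)
  let buckets : PySem.Dict Int (Option (Int × (List (String × Int)))) :=
    (PySem.List.pyRange 0 5 1).foldl (fun d b => d.insert b none) PySem.Dict.empty
  let buckets := ranked.foldl (fun d p =>
    let b := min (PySem.Int.floordiv p.1 bsize) (5 - 1)
    if d.getD b none = none then d.insert b (some p) else d) buckets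
  buckets.values.filterMap id

-- ===== PORT B =====
def bucket_seeds_py_alt (ranked : List (Int × (List (String × Int)))) (total : Int) : List (Int × (List (String × Int))) :=
  let bsize := max 1 (PySem.Int.floordiv total 5)
  (PySem.List.pyRange 0 5 1).foldl (fun acc b =>
    match ranked.find? (fun p => min (PySem.Int.floordiv p.1 bsize) (5 - 1) == b) with
    | some p => acc ++ [p]
    | none => acc) []

-- ===== PRECONDITION & SPEC =====
-- Pre_ excludes only inputs on which A raises KeyError: a negative frame index makes the
-- computed bucket index negative, which is not a key of A's bucket dict.
def Pre_bucket_seeds_py (ranked : List (Int × (List (String × Int)))) (total : Int) : Prop :=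
  ∀ p ∈ ranked, 0 ≤ p.1
instance (ranked : List (Int × (List (String × Int)))) (total : Int) : Decidable (Pre_bucket_seeds_py ranked total) := by unfold Pre_bucket_seeds_py; infer_instance

def pvWitness_bucket_seeds_py : (List (Int × (List (String × Int)))) × Int :=
  ([(0, [("a", 1)]), (7, [])], 10)

def Spec_bucket_seeds_py (ranked : List (Int × (List (String × Int)))) (total : Int) (out : List (Int × (List (String × Int)))) : Prop := out = bucket_seeds_py_alt ranked total
instance (ranked : List (Int × (List (String × Int)))) (total : Int) (out : List (Int × (List (String × Int)))) : Decidable (Spec_bucket_seeds_py ranked total out) := by unfold Spec_bucket_seeds_py; infer_instance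

-- ===== CLAIM (what is proved, stated in full; the proofs are below) =====
def Claim_equal_bucket_seeds_py : Prop := ∀ (ranked : List (Int × (List (String × Int)))) (total : Int), Dom_bucket_seeds_py ranked total → Pre_bucket_seeds_py ranked total → Spec_bucket_seeds_py ranked total (bucket_seeds_py ranked total)

-- ===== LEMMAS AND PROOFS =====

-- A's fill loop never adds or removes a key when every frame's bucket is already a key.
lemma pvKeysA (bsize : Int) (l : List (Int × (List (String × Int))))
    (d : PySem.Dict Int (Option (Int × (List (String × Int)))))
    (h : ∀ p ∈ l, d.contains (min (PySem.Int.floordiv p.1 bsize) (5 - 1)) = true) :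
    (l.foldl (fun d p =>
        let b := min (PySem.Int.floordiv p.1 bsize) (5 - 1)
        if d.getD b none = none then d.insert b (some p) else d) d).keys = d.keys := by
  induction l generalizing d with
  | nil => rfl
  | cons p rest ih =>
    have hp := h p (List.mem_cons_self ..)
    have hrest : ∀ q ∈ rest, d.contains (min (PySem.Int.floordiv q.1 bsize) (5 - 1)) = true :=
      fun q hq => h q (List.mem_cons_of_mem _ hq)
    simp only [List.foldl_cons]
    split
    · rw [ih]
      · exact PySem.Dict.keys_insert_of_contains _ _ hp
      · intro q hq
        rw [PySem.Dict.contains_insert, hrest q hq, Bool.or_true]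
    · exact ih _ hrest

-- After A's fill loop, the slot of bucket j holds its previous value or else the FIRST
-- frame of l whose bucket is j — exactly B's per-bucket scan.
lemma pvGetDA (bsize : Int) (l : List (Int × (List (String × Int))))
    (d : PySem.Dict Int (Option (Int × (List (String × Int))))) (j : Int) :
    (l.foldl (fun d p =>
        let b := min (PySem.Int.floordiv p.1 bsize) (5 - 1)
        if d.getD b none = none then d.insert b (some p) else d) d).getD j none
    = Option.or (d.getD j none)
        (l.find? (fun p => min (PySem.Int.floordiv p.1 bsize) (5 - 1) == j)) := by
  induction l generalizing d with
  | nil => simp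
  | cons p rest ih =>
    simp only [List.foldl_cons, List.find?_cons]
    by_cases hj : min (PySem.Int.floordiv p.1 bsize) (5 - 1) = j
    · simp only [hj, beq_self_eq_true]
      by_cases hc : d.getD j none = none
      · simp only [hc, ih, PySem.Dict.getD_insert, if_pos rfl]
        cases rest.find? (fun p => min (PySem.Int.floordiv p.1 bsize) (5 - 1) == j) <;> simp [Option.or]
      · rw [if_neg hc, ih]
        cases h' : d.getD j none with
        | none => exact absurd h' hc
        | some w => simp [Option.or]
    · have : (min (PySem.Int.floordiv p.1 bsize) (5 - 1) == j) = false := beq_eq_false_iff_ne.mpr hj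
      simp only [this, Bool.false_eq_true]
      split
      · rw [ih, PySem.Dict.getD_insert, if_neg (fun hh => hj hh.symm)]
      · exact ih d

-- ===== VERDICT (by name: the statement is the Claim_ definition above) =====
theorem bucket_seeds_py_spec : Claim_equal_bucket_seeds_py := by
  intro ranked total _ hpre
  unfold Spec_bucket_seeds_py bucket_seeds_py bucket_seeds_py_alt
  simp only []
  set bs := max 1 (PySem.Int.floordiv total 5) with hbs
  have hb1 : 1 ≤ bs := le_max_left _ _
  have hbkt : ∀ p ∈ ranked, min (PySem.Int.floordiv p.1 bs) (5 - 1) = 0 ∨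
      min (PySem.Int.floordiv p.1 bs) (5 - 1) = 1 ∨
      min (PySem.Int.floordiv p.1 bs) (5 - 1) = 2 ∨
      min (PySem.Int.floordiv p.1 bs) (5 - 1) = 3 ∨
      min (PySem.Int.floordiv p.1 bs) (5 - 1) = 4 := by
    intro p hp
    have h0 : 0 ≤ PySem.Int.floordiv p.1 bs := by
      rw [PySem.Int.floordiv_eq_ediv_of_pos (by omega)]
      exact Int.ediv_nonneg (hpre p hp) (by omega)
    omega
  have hd0 : ((PySem.List.pyRange 0 5 1).foldl (fun d b => d.insert b none) PySem.Dict.empty :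
      PySem.Dict Int (Option (Int × (List (String × Int))))) =
      PySem.Dict.mk [(0, none), (1, none), (2, none), (3, none), (4, none)] := by rfl
  rw [hd0]
  set d' := ranked.foldl (fun d p =>
    let b := min (PySem.Int.floordiv p.1 bs) (5 - 1)
    if d.getD b none = none then d.insert b (some p) else d)
    (PySem.Dict.mk [(0, none), (1, none), (2, none), (3, none), (4, none)]) with hd'
  have hkeys : d'.keys = [0, 1, 2, 3, 4] := by
    rw [hd', pvKeysA]
    · rfl
    · intro p hp
      rcases hbkt p hp with h | h | h | h | h <;> rw [h] <;> decide
  have hget : ∀ j : Int, d'.getD j none =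
      ranked.find? (fun p => min (PySem.Int.floordiv p.1 bs) (5 - 1) == j) := by
    intro j
    rw [hd', pvGetDA]
    have : (PySem.Dict.mk [((0:Int), (none : Option (Int × (List (String × Int))))),
        (1, none), (2, none), (3, none), (4, none)]).getD j none = none := by
      simp [PySem.Dict.getD_eq_get?_getD, PySem.Dict.get?_mk_cons]
      split_ifs <;> rfl
    rw [this, Option.none_or]
  have hvals : d'.values = [d'.getD 0 none, d'.getD 1 none, d'.getD 2 none, d'.getD 3 none,
      d'.getD 4 none] := by
    rw [PySem.Dict.values_eq_map_keys d' (by rw [hkeys]; decide) none, hkeys]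
    rfl
  rw [hvals, hget 0, hget 1, hget 2, hget 3, hget 4]
  have hr : PySem.List.pyRange 0 5 1 = [0, 1, 2, 3, 4] := by rfl
  rw [hr]
  simp only [List.foldl_cons, List.foldl_nil]
  norm_num
  rcases hg0 : ranked.find? (fun p => min (PySem.Int.floordiv p.1 bs) 4 == 0) with _ | p0 <;>
    rcases hg1 : ranked.find? (fun p => min (PySem.Int.floordiv p.1 bs) 4 == 1) with _ | p1 <;>
    rcases hg2 : ranked.find? (fun p => min (PySem.Int.floordiv p.1 bs) 4 == 2) with _ | p2 <;>
    rcases hg3 : ranked.find? (fun p => min (PySem.Int.floordiv p.1 bs) 4 == 3) with _ | p3 <;>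
    rcases hg4 : ranked.find? (fun p => min (PySem.Int.floordiv p.1 bs) 4 == 4) with _ | p4 <;>
    simp [hg0, hg1, hg2, hg3, hg4, List.filterMap]
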